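-- pv_equiv track=rewrite | github.com/redeye667/project1 | hw1.py | dups_lol
-- ===== SOURCE A (Python) =====
-- def dups_lol(lol):
--     # Use a set to track unique values
--     seen = set()
--     # Go through each item in the list of lists
--     for row in lol:
--         for item in row:
--             # If the element is already in the set, return True
--             if item in seen:
--                 return True
--             # Otherwise, add the element to the set
--             seen.add(item)
--
--     # If no duplicates are found, return False
--     return False
-- ===== SOURCE B (Python) =====
-- def dups_lol(lol):
--     # Flatten once, then compare total count with distinct count.
--     flat = [x for row in lol for x in row]
--     return len(flat) != len(set(flat))
-- ===== Notes on version B (the rewrite author's own statement) =====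
-- stated objective: simpler
-- what changed: Replaces the incremental membership-tested scan with early return by flattening all rows once and comparing the flat list's length with the length of its set of distinct elements.
import Mathlib
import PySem

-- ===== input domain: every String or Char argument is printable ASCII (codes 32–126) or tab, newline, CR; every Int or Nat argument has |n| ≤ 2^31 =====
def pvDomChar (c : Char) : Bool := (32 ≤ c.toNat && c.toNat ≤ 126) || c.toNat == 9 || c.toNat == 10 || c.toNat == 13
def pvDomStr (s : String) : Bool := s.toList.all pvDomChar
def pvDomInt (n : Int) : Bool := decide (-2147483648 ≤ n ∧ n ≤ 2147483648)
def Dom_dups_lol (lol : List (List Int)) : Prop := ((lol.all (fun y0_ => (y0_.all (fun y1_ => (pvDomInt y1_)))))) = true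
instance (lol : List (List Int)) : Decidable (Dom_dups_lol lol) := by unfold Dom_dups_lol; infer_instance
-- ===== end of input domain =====

-- B replaces A's incremental membership-tested scan with early return by one flattening
-- pass followed by a single length-vs-distinct-length comparison (objective: simpler).


-- ===== PORT A =====
-- inner loop 'for item in row': none = early 'return True', some seen' = loop finished
def dupsRowA (seen : PySem.Set Int) : List Int → Option (PySem.Set Int)
  | [] => some seen
  | item :: rest =>
      if PySem.Set.contains seen item then none
      else dupsRowA (PySem.Set.add seen item) rest

-- outer loop 'for row in lol'
def dupsGoA (seen : PySem.Set Int) : List (List Int) → Bool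
  | [] => false
  | row :: rest =>
      match dupsRowA seen row with
      | none => true
      | some seen' => dupsGoA seen' rest

def dups_lol (lol : List (List Int)) : Bool := dupsGoA PySem.Set.empty lol

-- ===== PORT B =====
def dups_lol_alt (lol : List (List Int)) : Bool :=
  let flat := lol.flatMap (fun row => row)
  decide (flat.length ≠ (PySem.Set.ofList flat).length)

-- ===== PRECONDITION & SPEC =====
def Spec_dups_lol (lol : List (List Int)) (out : Bool) : Prop := out = dups_lol_alt lol
instance (lol : List (List Int)) (out : Bool) : Decidable (Spec_dups_lol lol out) := by unfold Spec_dups_lol; infer_instance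

-- ===== CLAIM =====
def Claim_equal_dups_lol : Prop := ∀ (lol : List (List Int)), Dom_dups_lol lol → Spec_dups_lol lol (dups_lol lol)

-- ===== LEMMAS AND PROOFS =====
theorem dupsRowA_eq (row : List Int) : ∀ (seen : PySem.Set Int), seen.Nodup →
    dupsRowA seen row = if (seen ++ row).Nodup then some (seen ++ row) else none := by
  induction row with
  | nil => intro seen h; simp [dupsRowA, h]
  | cons x xs ih =>
    intro seen h
    by_cases hx : x ∈ seen
    · have hc : PySem.Set.contains seen x = true := (PySem.Set.contains_iff seen x).mpr hx
      have hnn : ¬ (seen ++ x :: xs).Nodup := by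
        rw [List.nodup_append]
        rintro ⟨-, -, hdisj⟩
        exact hdisj x hx x (by simp) rfl
      simp [dupsRowA, hnn]
      intro h'
      exact absurd hx h'
    · have hc : PySem.Set.contains seen x = false := by
        rw [← Bool.not_eq_true, PySem.Set.contains_iff]; exact hx
      have hadd : PySem.Set.add seen x = seen ++ [x] := PySem.Set.add_of_not_mem hx
      have hnd : (seen ++ [x]).Nodup := by
        rw [List.nodup_append]
        refine ⟨h, List.nodup_singleton x, ?_⟩
        intro b hb c hc
        simp at hc
        subst hc
        intro hbx
        exact hx (hbx ▸ hb)
      rw [dupsRowA, hc]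
      simp only [Bool.false_eq_true, if_false]
      rw [hadd, ih _ hnd, List.append_assoc]
      simp

theorem dupsGoA_eq (lol : List (List Int)) : ∀ (seen : PySem.Set Int), seen.Nodup →
    dupsGoA seen lol = !decide ((seen ++ lol.flatMap (fun r => r)).Nodup) := by
  induction lol with
  | nil => intro seen h; simp [dupsGoA, h]
  | cons row rest ih =>
    intro seen h
    rw [dupsGoA, dupsRowA_eq row seen h]
    by_cases hnd : (seen ++ row).Nodup
    · rw [if_pos hnd]
      show dupsGoA (seen ++ row) rest = _
      rw [ih _ hnd]
      simp [List.append_assoc]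
    · rw [if_neg hnd]
      show true = _
      have hcon : ¬ (seen ++ (row :: rest).flatMap (fun r => r)).Nodup := by
        intro hcon
        apply hnd
        have heq : (seen ++ (row :: rest).flatMap (fun r => r)) = (seen ++ row) ++ rest.flatMap (fun r => r) := by
          simp [List.append_assoc]
        rw [heq] at hcon
        exact hcon.of_append_left
      simpa using hcon

theorem len_ofList_eq_iff (xs : List Int) : (PySem.Set.ofList xs).length = xs.length ↔ xs.Nodup := by
  have hperm : (PySem.Set.ofList xs).Perm xs.dedup := by
    apply (List.perm_ext_iff_of_nodup (PySem.Set.nodup_ofList _) xs.nodup_dedup).mpr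
    intro a; simp [PySem.Set.mem_ofList, List.mem_dedup]
  rw [hperm.length_eq]
  constructor
  · intro h
    exact List.dedup_eq_self.mp (xs.dedup_sublist.eq_of_length h)
  · intro h; rw [List.dedup_eq_self.mpr h]

-- ===== VERDICT =====
theorem dups_lol_spec : Claim_equal_dups_lol := by
  intro lol _
  unfold Spec_dups_lol dups_lol dups_lol_alt
  rw [dupsGoA_eq lol PySem.Set.empty List.nodup_nil]
  rw [show (PySem.Set.empty : PySem.Set Int) = ([] : List Int) from rfl, List.nil_append]
  by_cases h : (lol.flatMap (fun r => r)).Nodup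
  · rw [decide_eq_true h]
    have hl := (len_ofList_eq_iff (lol.flatMap (fun r => r))).mpr h
    simp only [hl, Bool.not_true, ne_eq, not_true_eq_false]
    rfl
  · rw [decide_eq_false h]
    have hl : (lol.flatMap (fun r => r)).length ≠ (PySem.Set.ofList (lol.flatMap (fun r => r))).length :=
      fun hc => h ((len_ofList_eq_iff _).mp hc.symm)
    simp only [Bool.not_false, ne_eq]
    simpa using hl
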